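-- pv_equiv track=rewrite | github.com/MithicSpirit/aoc2022 | day01/day01.py | get3_max_sum
-- ===== SOURCE A (Python) =====
-- def get3_max_sum(data):
--     vals = map(sum, parse(data))
--     first = second = third = 0
--     for v in vals:
--         if v <= third:
--             continue
--         third = v
--         if third <= second:
--             continue
--         second, third = third, second
--         if second <= first:
--             continue
--         first, second = second, first
--     return first + second + third
--
-- def parse(data):
--     lines = data.split("\n")
--     groups = []
--     current = []
--     for line in lines:
--         if line == "":
--             groups.append(current)
--             current = []
--         else:
--             current.append(int(line))
--     return groups
-- ===== SOURCE B (Python) =====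
-- def get3_max_sum(data):
--     sums = [sum(group) for group in parse(data)]
--     return sum(sorted(sums + [0, 0, 0], reverse=True)[:3])
--
--
-- def parse(data):
--     lines = data.split("\n")
--     groups = []
--     current = []
--     for line in lines:
--         if line == "":
--             groups.append(current)
--             current = []
--         else:
--             current.append(int(line))
--     return groups
-- ===== Notes on version B (the rewrite author's own statement) =====
-- stated objective: simpler
-- what changed: Replaces A's hand-maintained three-slot online top-3 loop with conditional swaps by summing the first three elements of the descending sort of the group sums padded with [0,0,0] (parse kept unchanged).
import Mathlib
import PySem

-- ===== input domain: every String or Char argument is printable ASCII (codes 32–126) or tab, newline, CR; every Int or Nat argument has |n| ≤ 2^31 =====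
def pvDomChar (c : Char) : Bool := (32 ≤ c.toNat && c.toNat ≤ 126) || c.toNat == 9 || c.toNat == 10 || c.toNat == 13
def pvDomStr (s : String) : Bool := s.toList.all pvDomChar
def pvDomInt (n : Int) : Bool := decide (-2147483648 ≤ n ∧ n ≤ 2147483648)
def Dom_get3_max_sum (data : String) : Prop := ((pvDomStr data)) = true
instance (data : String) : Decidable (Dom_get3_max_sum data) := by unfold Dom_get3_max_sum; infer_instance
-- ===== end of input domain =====

-- B replaces A's hand-maintained online top-3 slots by summing the first three of the
-- descending sort of the group sums padded with [0,0,0] (objective: simpler).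

-- ===== PORT A =====
-- shared helper: data.split("\n"); split? is none only for an empty separator, never here
def pvLines (data : String) : List String := (PySem.Str.split? data "\n").getD []

-- shared helper: Python's parse(data); 'none' = a ValueError from int(line) (excluded by Pre_)
def pvParseLoop (lines : List String) (groups : List (List Int)) (current : List Int) :
    Option (List (List Int)) :=
  match lines with
  | [] => some groups
  | line :: rest =>
    if line = "" then pvParseLoop rest (groups ++ [current]) []
    else
      match PySem.Int.ofStr? line with
      | none => none
      | some n => pvParseLoop rest groups (current ++ [n])

-- A's loop body: third = v; conditional swaps up the three slots
def pvStep (st : Int × Int × Int) (v : Int) : Int × Int × Int :=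
  if v ≤ st.2.2 then st
  else if v ≤ st.2.1 then (st.1, st.2.1, v)
  else if v ≤ st.1 then (st.1, v, st.2.1)
  else (v, st.1, st.2.1)

def get3_max_sum (data : String) : Int :=
  match pvParseLoop (pvLines data) [] [] with
  | none => 0  -- int(line) raised; outside Pre_
  | some groups =>
    let vals := groups.map List.sum
    let res := vals.foldl pvStep (0, 0, 0)
    res.1 + res.2.1 + res.2.2

-- ===== PORT B =====
def get3_max_sum_alt (data : String) : Int :=
  match pvParseLoop (pvLines data) [] [] with
  | none => 0  -- int(line) raised; outside Pre_
  | some groups =>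
    let sums := groups.map List.sum
    (PySem.List.slice (PySem.List.sorted (sums ++ [0, 0, 0]) (fun x => x) true)
      none (some 3)).sum

-- ===== PRECONDITION & SPEC =====
-- Pre_ excludes exactly the inputs where int(line) raises ValueError (a line that is
-- neither empty nor a Python int literal).
def Pre_get3_max_sum (data : String) : Prop :=
  ∀ line ∈ pvLines data, line ≠ "" → (PySem.Int.ofStr? line).isSome = true
instance (data : String) : Decidable (Pre_get3_max_sum data) := by
  unfold Pre_get3_max_sum; infer_instance

def pvWitness_get3_max_sum : String := "1\n2\n\n3\n\n-4\n"

def Spec_get3_max_sum (data : String) (out : Int) : Prop := out = get3_max_sum_alt data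
instance (data : String) (out : Int) : Decidable (Spec_get3_max_sum data out) := by
  unfold Spec_get3_max_sum; infer_instance

-- ===== CLAIM (what is proved, stated in full; the proofs are below) =====
def Claim_equal_get3_max_sum : Prop :=
  ∀ (data : String), Dom_get3_max_sum data → Pre_get3_max_sum data →
    Spec_get3_max_sum data (get3_max_sum data)

-- ===== LEMMAS AND PROOFS =====

-- uniqueness of the descending sort: any pairwise-≥ permutation IS sorted(xs, reverse=True)
theorem pvSortedDesc_eq (xs ys : List Int) (hp : ys.Perm xs)
    (hs : ys.Pairwise (fun a b : Int => b ≤ a)) :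
    PySem.List.sorted xs (fun x => x) true = ys := by
  have h1 : (PySem.List.sorted xs (fun x => x) true).Perm ys :=
    (PySem.List.sorted_perm xs (fun x => x) true).trans hp.symm
  have h2 : (PySem.List.sorted xs (fun x => x) true).Pairwise (fun a b : Int => b ≤ a) :=
    PySem.List.sorted_pairwise_rev xs (fun x => x)
  exact List.Perm.eq_of_pairwise (fun a b _ _ h h' => le_antisymm h' h) h2 hs h1

-- the loop invariant: folding pvStep from a sorted triple computes the first three of
-- the descending sort of the whole list (and the third slot never decreases)
theorem pvStep_invariant (xs : List Int) : ∀ (a b c : Int), b ≤ a → c ≤ b →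
    ∃ r : List Int,
      PySem.List.sorted (a :: b :: c :: xs) (fun x => x) true =
        (xs.foldl pvStep (a, b, c)).1 :: (xs.foldl pvStep (a, b, c)).2.1 ::
          (xs.foldl pvStep (a, b, c)).2.2 :: r ∧
      (∀ x ∈ r, x ≤ (xs.foldl pvStep (a, b, c)).2.2) ∧
      c ≤ (xs.foldl pvStep (a, b, c)).2.2 := by
  induction xs with
  | nil =>
    intro a b c hba hcb
    simp only [List.foldl_nil]
    refine ⟨[], ?_, by simp, le_refl c⟩
    refine pvSortedDesc_eq _ _ (List.Perm.refl _) ?_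
    refine List.Pairwise.cons ?_ (List.Pairwise.cons ?_ (List.Pairwise.cons (by simp)
      List.Pairwise.nil))
    · intro x hx; simp at hx; rcases hx with rfl | rfl <;> omega
    · intro x hx; simp at hx; omega
  | cons v xs ih =>
    intro a b c hba hcb
    -- one step: the new triple (a',b',c') is sorted, the dropped element m is ≤ c'
    have key : ∀ (a' b' c' m : Int), b' ≤ a' → c' ≤ b' → m ≤ c' → c ≤ c' →
        (a :: b :: c :: v :: xs).Perm (m :: a' :: b' :: c' :: xs) →
        ∃ r : List Int,
          PySem.List.sorted (a :: b :: c :: v :: xs) (fun x => x) true =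
            (xs.foldl pvStep (a', b', c')).1 :: (xs.foldl pvStep (a', b', c')).2.1 ::
              (xs.foldl pvStep (a', b', c')).2.2 :: r ∧
          (∀ x ∈ r, x ≤ (xs.foldl pvStep (a', b', c')).2.2) ∧
          c ≤ (xs.foldl pvStep (a', b', c')).2.2 := by
      intro a' b' c' m hba' hcb' hmc' hcc' hperm
      obtain ⟨r, hr, hrle, hc't⟩ := ih a' b' c' hba' hcb'
      set F := (xs.foldl pvStep (a', b', c')) with hF
      have hpw : (F.1 :: F.2.1 :: F.2.2 :: r).Pairwise (fun a b : Int => b ≤ a) := by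
        rw [← hr]; exact PySem.List.sorted_pairwise_rev _ _
      simp only [List.pairwise_cons] at hpw
      obtain ⟨h1f, h2s, h3t, h4r⟩ := hpw
      have hst : F.2.2 ≤ F.2.1 := h2s F.2.2 (by simp)
      have hfs : F.2.1 ≤ F.1 := h1f F.2.1 (by simp)
      have hmt : m ≤ F.2.2 := hmc'.trans hc't
      have hmemr : ∀ x ∈ PySem.List.sorted (m :: r) (fun y => y) true, x ≤ F.2.2 := by
        intro x hx
        have hx' : x ∈ m :: r := (PySem.List.mem_sorted _ _ _ _).1 hx
        simp only [List.mem_cons] at hx'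
        rcases hx' with rfl | hx'
        · exact hmt
        · exact hrle x hx'
      refine ⟨PySem.List.sorted (m :: r) (fun y => y) true, ?_, hmemr, hcc'.trans hc't⟩
      apply pvSortedDesc_eq
      · -- permutation bookkeeping
        have hsp : (F.1 :: F.2.1 :: F.2.2 :: r).Perm (a' :: b' :: c' :: xs) := by
          rw [← hr]; exact PySem.List.sorted_perm _ _ _
        have hmr : (PySem.List.sorted (m :: r) (fun y => y) true).Perm (m :: r) :=
          PySem.List.sorted_perm _ _ _
        have step1 : (F.1 :: F.2.1 :: F.2.2 ::
            PySem.List.sorted (m :: r) (fun y => y) true).Perm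
            (F.1 :: F.2.1 :: F.2.2 :: m :: r) := ((hmr.cons _).cons _).cons _
        have step2 : (F.1 :: F.2.1 :: F.2.2 :: m :: r).Perm (m :: F.1 :: F.2.1 :: F.2.2 :: r) :=
          ((((List.Perm.swap m F.2.2 r).cons F.2.1).cons F.1).trans
            (((List.Perm.swap m F.2.1 (F.2.2 :: r)).cons F.1))).trans
            (List.Perm.swap m F.1 (F.2.1 :: F.2.2 :: r))
        exact (step1.trans step2).trans ((hsp.cons m).trans hperm.symm)
      · -- sortedness
        refine List.pairwise_cons.2 ⟨?_, List.pairwise_cons.2 ⟨?_, List.pairwise_cons.2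
          ⟨hmemr, PySem.List.sorted_pairwise_rev _ _⟩⟩⟩
        · intro x hx
          simp only [List.mem_cons] at hx
          rcases hx with hx | hx | hx
          · exact hx ▸ hfs
          · exact hx ▸ (hst.trans hfs)
          · exact (hmemr x (by simpa using hx)).trans (hst.trans hfs)
        · intro x hx
          simp only [List.mem_cons] at hx
          rcases hx with hx | hx
          · exact hx ▸ hst
          · exact (hmemr x (by simpa using hx)).trans hst
    have hfold : (v :: xs).foldl pvStep (a, b, c) = xs.foldl pvStep (pvStep (a, b, c) v) := rfl
    by_cases h1 : v ≤ c
    · have hstep : pvStep (a, b, c) v = (a, b, c) := by simp [pvStep, h1]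
      rw [hfold, hstep]
      refine key a b c v hba hcb h1 (le_refl c) ?_
      exact (((List.Perm.swap v c xs).cons b).cons a).trans
        (((List.Perm.swap v b (c :: xs)).cons a).trans (List.Perm.swap v a (b :: c :: xs)))
    · have hca : (a :: b :: c :: v :: xs).Perm (c :: a :: b :: v :: xs) :=
        (((List.Perm.swap c b (v :: xs)).cons a)).trans (List.Perm.swap c a (b :: v :: xs))
      by_cases h2 : v ≤ b
      · have hstep : pvStep (a, b, c) v = (a, b, v) := by simp [pvStep, h1, h2]
        rw [hfold, hstep]
        exact key a b v c hba h2 (by omega) (by omega) hca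
      · have hcav : (a :: b :: c :: v :: xs).Perm (c :: a :: v :: b :: xs) :=
          hca.trans (((List.Perm.swap v b xs).cons a).cons c)
        by_cases h3 : v ≤ a
        · have hstep : pvStep (a, b, c) v = (a, v, b) := by simp [pvStep, h1, h2, h3]
          rw [hfold, hstep]
          exact key a v b c h3 (by omega) hcb hcb hcav
        · have hstep : pvStep (a, b, c) v = (v, a, b) := by simp [pvStep, h1, h2, h3]
          rw [hfold, hstep]
          refine key v a b c (by omega) hba hcb hcb ?_
          exact hcav.trans (((List.Perm.swap v a (b :: xs)).cons c))

-- the per-list core fact: A's fold total = B's sorted-take-3 total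
theorem pvCore (xs : List Int) :
    (PySem.List.slice (PySem.List.sorted (xs ++ [0, 0, 0]) (fun x => x) true)
        none (some 3)).sum =
      (xs.foldl pvStep (0, 0, 0)).1 + (xs.foldl pvStep (0, 0, 0)).2.1 +
        (xs.foldl pvStep (0, 0, 0)).2.2 := by
  obtain ⟨r, hr, hrle, -⟩ := pvStep_invariant xs 0 0 0 (le_refl 0) (le_refl 0)
  set F := xs.foldl pvStep (0, 0, 0) with hF
  have hperm : (F.1 :: F.2.1 :: F.2.2 :: r).Perm (xs ++ [0, 0, 0]) := by
    have h1 : (F.1 :: F.2.1 :: F.2.2 :: r).Perm ((0 : Int) :: 0 :: 0 :: xs) := by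
      rw [← hr]; exact PySem.List.sorted_perm _ _ _
    have h2 : ((0 : Int) :: 0 :: 0 :: xs).Perm (xs ++ [0, 0, 0]) := by
      have he : ((0 : Int) :: 0 :: 0 :: xs) = [0, 0, 0] ++ xs := rfl
      rw [he]; exact List.perm_append_comm
    exact h1.trans h2
  have hpw : (F.1 :: F.2.1 :: F.2.2 :: r).Pairwise (fun a b : Int => b ≤ a) := by
    rw [← hr]; exact PySem.List.sorted_pairwise_rev _ _
  have hs : PySem.List.sorted (xs ++ [0, 0, 0]) (fun x => x) true =
      F.1 :: F.2.1 :: F.2.2 :: r := pvSortedDesc_eq _ _ hperm hpw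
  rw [hs, PySem.List.slice_to _ (by norm_num)]
  show (List.take 3 (F.1 :: F.2.1 :: F.2.2 :: r)).sum = _
  simp [List.take_succ_cons]
  ring

-- ===== VERDICT (by name: the statement is the Claim_ definition above) =====
theorem get3_max_sum_spec : Claim_equal_get3_max_sum := by
  intro data _ _
  unfold Spec_get3_max_sum get3_max_sum get3_max_sum_alt
  cases pvParseLoop (pvLines data) [] [] with
  | none => rfl
  | some groups => exact (pvCore (groups.map List.sum)).symm
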